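-- pv_equiv track=rewrite | github.com/Mahikolhe23/WalletWatcher | main.py | get_tran_type
-- ===== SOURCE A (Python) =====
-- def get_tran_type(trans):
--     tran = None
--     for t in trans:
--         if 'debit' in t.lower():
--             tran = 'Debit'
--         if 'credit' in t.lower():
--             tran = 'Credit'
--     return tran
-- ===== SOURCE B (Python) =====
-- def get_tran_type(trans):
--     for t in reversed(trans):
--         low = t.lower()
--         if 'credit' in low:
--             return 'Credit'
--         if 'debit' in low:
--             return 'Debit'
--     return None
-- ===== Notes on version B (the rewrite author's own statement) =====
-- stated objective: alternative
-- what changed: Replaces the forward accumulator scan of the whole list with a reverse iteration that returns early at the last matching element (credit checked before debit to keep intra-element priority).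
import Mathlib
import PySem

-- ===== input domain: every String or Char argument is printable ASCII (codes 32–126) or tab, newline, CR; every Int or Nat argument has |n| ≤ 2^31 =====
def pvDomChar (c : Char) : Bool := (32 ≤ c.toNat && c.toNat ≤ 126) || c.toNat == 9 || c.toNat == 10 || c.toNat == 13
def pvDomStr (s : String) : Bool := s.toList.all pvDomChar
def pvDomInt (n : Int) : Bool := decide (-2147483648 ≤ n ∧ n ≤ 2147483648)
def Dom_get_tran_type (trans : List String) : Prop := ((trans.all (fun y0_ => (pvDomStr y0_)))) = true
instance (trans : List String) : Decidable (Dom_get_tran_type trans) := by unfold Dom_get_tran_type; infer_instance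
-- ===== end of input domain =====

-- B replaces A's forward accumulator scan with a reverse early-exit scan (alternative decomposition, same result).

-- ===== PORT A =====
def get_tran_type (trans : List String) : Option String :=
  trans.foldl (fun tran t =>
    let tran := if PySem.Str.isIn "debit" (PySem.Str.lower t) then some "Debit" else tran
    if PySem.Str.isIn "credit" (PySem.Str.lower t) then some "Credit" else tran) none

-- ===== PORT B =====
-- the 'for t in reversed(trans)' loop with early return
def gttRevLoop : List String → Option String
  | [] => none
  | t :: rest =>
    let low := PySem.Str.lower t
    if PySem.Str.isIn "credit" low then some "Credit"
    else if PySem.Str.isIn "debit" low then some "Debit"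
    else gttRevLoop rest

def get_tran_type_alt (trans : List String) : Option String :=
  gttRevLoop trans.reverse

-- ===== PRECONDITION & SPEC =====
def Spec_get_tran_type (trans : List String) (out : Option String) : Prop := out = get_tran_type_alt trans
instance (trans : List String) (out : Option String) : Decidable (Spec_get_tran_type trans out) := by unfold Spec_get_tran_type; infer_instance

-- ===== CLAIM (what is proved, stated in full; the proofs are below) =====
def Claim_equal_get_tran_type : Prop := ∀ (trans : List String), Dom_get_tran_type trans → Spec_get_tran_type trans (get_tran_type trans)

-- ===== LEMMAS AND PROOFS =====

-- the per-element decision (value A's loop body assigns starting from None)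
def gttCheck (t : String) : Option String :=
  if PySem.Str.isIn "credit" (PySem.Str.lower t) then some "Credit"
  else if PySem.Str.isIn "debit" (PySem.Str.lower t) then some "Debit"
  else none

lemma gttRevLoop_cons (t : String) (rest : List String) :
    gttRevLoop (t :: rest) = (gttCheck t).or (gttRevLoop rest) := by
  simp only [gttRevLoop, gttCheck]
  split_ifs <;> simp [Option.or]

lemma gttRevLoop_append_singleton (xs : List String) (t : String) :
    gttRevLoop (xs ++ [t]) = (gttRevLoop xs).or (gttCheck t) := by
  induction xs with
  | nil => simp [gttRevLoop_cons, gttRevLoop]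
  | cons a xs ih =>
      rw [List.cons_append, gttRevLoop_cons, gttRevLoop_cons, ih, Option.or_assoc]

lemma gttFoldl_eq (l : List String) (acc : Option String) :
    l.foldl (fun tran t =>
      let tran := if PySem.Str.isIn "debit" (PySem.Str.lower t) then some "Debit" else tran
      if PySem.Str.isIn "credit" (PySem.Str.lower t) then some "Credit" else tran) acc
    = (gttRevLoop l.reverse).or acc := by
  induction l generalizing acc with
  | nil => simp [gttRevLoop]
  | cons t l ih =>
      rw [List.foldl_cons, ih, List.reverse_cons, gttRevLoop_append_singleton,
        Option.or_assoc]
      congr 1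
      simp only [gttCheck]
      split_ifs <;> simp [Option.or]

-- ===== VERDICT (by name: the statement is the Claim_ definition above) =====
theorem get_tran_type_spec : Claim_equal_get_tran_type := by
  intro trans _
  show get_tran_type trans = get_tran_type_alt trans
  rw [get_tran_type, get_tran_type_alt, gttFoldl_eq, Option.or_none]
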